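-- pv_equiv track=rewrite | github.com/SvobodaJakub/woolnote | woolnote/util.py | task_body_save_fix_multiline_markup_bullet_lists
-- ===== SOURCE A (Python) =====
-- def task_body_save_fix_multiline_markup_bullet_lists(plain):
--     # TODO: docstring
--     """Replicates last used bullet list/task list style on the immediately following non-empty lines (so that the user has easier input). Prepends and appends at least 4 newlines if there are less than 4 newlines on the beginning/end."""
--     lines = plain.replace("\r", "").split("\n")
--     newlines = []
--     style = None
--     valid = {"*", "**", "***", "****", "+", "-"}
--     # valid2 = {"* [ ]", "** [ ]", "*** [ ]", "**** [ ]"}  # TODO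
--     for line in lines:
--         # util.dbgprint(str(repr(line)))
--         if line == "":
--             style = None
--             newlines.append(line)
--         else:
--             parts = line.split(" ")
--             if len(parts) > 1 and parts[0] in valid:
--                 style = parts[0]
--                 newlines.append(line)
--             else:
--                 if style is not None:
--                     newlines.append(style + " " + line)
--                 else:
--                     newlines.append(line)
--
--     howmanyemptylinestoappend = 4
--     prependnewlinecount = 0
--     appendnewlinecount = 0
--     beg = True
--     newlines2 = []
--     for line in newlines:
--         if beg:
--             if line == "":
--                 prependnewlinecount += 1
--             else:
--                 if prependnewlinecount < howmanyemptylinestoappend: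
--                     for i in range(howmanyemptylinestoappend - prependnewlinecount):
--                         newlines2.append("")
--                 beg = False
--         else:
--             if line == "":
--                 appendnewlinecount += 1
--             else:
--                 appendnewlinecount = 0
--         newlines2.append(line)
--     if appendnewlinecount < howmanyemptylinestoappend:
--         for i in range(howmanyemptylinestoappend - appendnewlinecount):
--             newlines2.append("")
--     newplain = "\n".join(newlines2)
--     return newplain
-- ===== SOURCE B (Python) =====
-- def _leading_empty(lines):
--     n = 0
--     for line in lines:
--         if line != "":
--             break
--         n += 1
--     return n
--
--
-- def task_body_save_fix_multiline_markup_bullet_lists(plain):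
--     """Replicates the last used bullet/task list style on immediately following
--     non-empty lines, then pads the text so it starts and ends with at least 4
--     empty lines; padding is done by index arithmetic instead of a flag+counter pass."""
--     lines = plain.replace("\r", "").split("\n")
--     valid = {"*", "**", "***", "****", "+", "-"}
--     newlines = []
--     style = None
--     for line in lines:
--         if line == "":
--             style = None
--             newlines.append(line)
--         else:
--             parts = line.split(" ")
--             if len(parts) > 1 and parts[0] in valid:
--                 style = parts[0]
--                 newlines.append(line)
--             elif style is not None:
--                 newlines.append(style + " " + line)
--             else:
--                 newlines.append(line)
--     lead = _leading_empty(newlines)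
--     if lead == len(newlines):
--         return "\n".join(newlines + [""] * 4)
--     trail = _leading_empty(newlines[::-1])
--     content = newlines[lead:len(newlines) - trail]
--     return "\n".join([""] * max(4, lead) + content + [""] * max(4, trail))
-- ===== Notes on version B (the rewrite author's own statement) =====
-- stated objective: simpler
-- what changed: The second pass (a stateful flag+counter loop that interleaves prepend-padding, trailing-blank counting and copying) is replaced by counting leading/trailing empty lines and assembling the result by index arithmetic: [''] * max(4, lead) + newlines[lead:len-trail] + [''] * max(4, trail), with the all-empty case returning newlines + [''] * 4.
import Mathlib
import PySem

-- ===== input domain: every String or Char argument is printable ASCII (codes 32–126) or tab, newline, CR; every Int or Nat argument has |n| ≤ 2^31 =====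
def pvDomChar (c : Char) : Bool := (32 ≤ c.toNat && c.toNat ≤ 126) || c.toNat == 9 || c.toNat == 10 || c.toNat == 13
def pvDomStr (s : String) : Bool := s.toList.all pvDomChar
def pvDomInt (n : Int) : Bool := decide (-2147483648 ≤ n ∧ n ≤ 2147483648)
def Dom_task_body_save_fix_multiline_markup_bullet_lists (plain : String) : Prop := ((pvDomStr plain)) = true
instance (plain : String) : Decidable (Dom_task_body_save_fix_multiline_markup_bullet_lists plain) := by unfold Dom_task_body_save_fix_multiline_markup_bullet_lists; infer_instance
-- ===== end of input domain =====

-- B replaces A's flag+counter padding pass by index arithmetic (leading/trailing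
-- empty-line counts and one slice); objective: simpler second pass, same value.

-- ===== PORT A =====
def pvValidA : PySem.Set String := PySem.Set.ofList ["*", "**", "***", "****", "+", "-"]

-- one iteration of A's first loop (style replication); state = (style, newlines)
def pvStyleStepA (st : Option String × List String) (line : String) : Option String × List String :=
  if line = "" then (none, st.2 ++ [line])
  else
    let parts := (PySem.Str.split? line " ").getD []
    if parts.length > 1 ∧ PySem.Set.contains pvValidA (parts.headD "") = true then
      (some (parts.headD ""), st.2 ++ [line])
    else
      match st.1 with
      | some s => (st.1, st.2 ++ [s ++ " " ++ line])
      | none   => (st.1, st.2 ++ [line])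

-- 'for i in range(k): newlines2.append("")'
def pvAppendBlanks (acc : List String) (k : Nat) : List String :=
  (List.range k).foldl (fun a _ => a ++ [""]) acc

-- one iteration of A's second loop; state = (beg, prependcount, appendcount, newlines2)
def pvStep2A (st : Bool × Nat × Nat × List String) (line : String) : Bool × Nat × Nat × List String :=
  match st with
  | (beg, pre, app, acc) =>
    if beg then
      if line = "" then (beg, pre + 1, app, acc ++ [line])
      else
        let acc2 := if pre < 4 then pvAppendBlanks acc (4 - pre) else acc
        (false, pre, app, acc2 ++ [line])
    else
      if line = "" then (beg, pre, app + 1, acc ++ [line])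
      else (beg, pre, 0, acc ++ [line])

def task_body_save_fix_multiline_markup_bullet_lists (plain : String) : String :=
  let lines := (PySem.Str.split? (PySem.Str.replace plain "\r" "") "\n").getD []
  let newlines := (lines.foldl pvStyleStepA (none, [])).2
  let st := newlines.foldl pvStep2A (true, 0, 0, [])
  let newlines2 := if st.2.2.1 < 4 then pvAppendBlanks st.2.2.2 (4 - st.2.2.1) else st.2.2.2
  PySem.Str.join "\n" newlines2

-- ===== PORT B =====
def pvValidB : PySem.Set String := PySem.Set.ofList ["*", "**", "***", "****", "+", "-"]

-- one iteration of B's first loop (same replication pass as A, elif chain)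
def pvStyleStepB (st : Option String × List String) (line : String) : Option String × List String :=
  if line = "" then (none, st.2 ++ [line])
  else
    let parts := (PySem.Str.split? line " ").getD []
    if parts.length > 1 ∧ PySem.Set.contains pvValidB (parts.headD "") = true then
      (some (parts.headD ""), st.2 ++ [line])
    else
      match st.1 with
      | some s => (st.1, st.2 ++ [s ++ " " ++ line])
      | none   => (st.1, st.2 ++ [line])

-- Source B's _leading_empty: count of leading empty lines
def pvLeadingEmpty : List String → Nat
  | [] => 0
  | line :: rest => if line ≠ "" then 0 else pvLeadingEmpty rest + 1

def task_body_save_fix_multiline_markup_bullet_lists_alt (plain : String) : String :=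
  let lines := (PySem.Str.split? (PySem.Str.replace plain "\r" "") "\n").getD []
  let newlines := (lines.foldl pvStyleStepB (none, [])).2
  let lead := pvLeadingEmpty newlines
  if lead = newlines.length then
    PySem.Str.join "\n" (newlines ++ List.replicate 4 "")
  else
    let trail := pvLeadingEmpty newlines.reverse
    let content := PySem.List.slice newlines (some (lead : Int)) (some ((newlines.length : Int) - (trail : Int)))
    PySem.Str.join "\n" (List.replicate (max 4 lead) "" ++ content ++ List.replicate (max 4 trail) "")

-- ===== PRECONDITION & SPEC =====
def Spec_task_body_save_fix_multiline_markup_bullet_lists (plain : String) (out : String) : Prop := out = task_body_save_fix_multiline_markup_bullet_lists_alt plain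
instance (plain : String) (out : String) : Decidable (Spec_task_body_save_fix_multiline_markup_bullet_lists plain out) := by unfold Spec_task_body_save_fix_multiline_markup_bullet_lists; infer_instance

-- ===== CLAIM (what is proved, stated in full; the proofs are below) =====
def Claim_equal_task_body_save_fix_multiline_markup_bullet_lists : Prop := ∀ (plain : String), Dom_task_body_save_fix_multiline_markup_bullet_lists plain → Spec_task_body_save_fix_multiline_markup_bullet_lists plain (task_body_save_fix_multiline_markup_bullet_lists plain)

-- ===== LEMMAS AND PROOFS =====

theorem pvAppendBlanks_eq (acc : List String) (k : Nat) :
    pvAppendBlanks acc k = acc ++ List.replicate k "" := by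
  induction k with
  | zero => simp [pvAppendBlanks]
  | succ n ih =>
    simp [pvAppendBlanks, List.range_succ, List.foldl_append] at *
    simp [ih, List.replicate_succ']

theorem pvLE_le (l : List String) : pvLeadingEmpty l ≤ l.length := by
  induction l with
  | nil => simp [pvLeadingEmpty]
  | cons x r ih => by_cases h : x = "" <;> simp [pvLeadingEmpty, h] <;> omega

theorem pvLE_decomp (l : List String) :
    l = List.replicate (pvLeadingEmpty l) "" ++ l.drop (pvLeadingEmpty l) := by
  induction l with
  | nil => simp [pvLeadingEmpty]
  | cons x r ih =>
    by_cases h : x = ""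
    · simp [pvLeadingEmpty, h, List.replicate_succ]
      exact ih
    · simp [pvLeadingEmpty, h]

theorem pvLE_head : ∀ l : List String, pvLeadingEmpty l ≠ l.length →
    ∃ x r, l.drop (pvLeadingEmpty l) = x :: r ∧ x ≠ ""
  | [], h => by simp [pvLeadingEmpty] at h
  | x :: r, h => by
    by_cases hx : x = ""
    · have h' : pvLeadingEmpty r ≠ r.length := by
        intro he
        apply h
        simp [pvLeadingEmpty, hx, he]
      obtain ⟨y, r', hd, hy⟩ := pvLE_head r h'
      refine ⟨y, r', ?_, hy⟩
      simpa [pvLeadingEmpty, hx] using hd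
    · exact ⟨x, r, by simp [pvLeadingEmpty, hx], hx⟩

theorem pvAllEmpty_replicate (l : List String) (h : ∀ y ∈ l, y = "") :
    l = List.replicate l.length "" := by
  induction l with
  | nil => simp
  | cons x r ih =>
    simp [List.replicate_succ]
    exact ⟨h x (by simp), ih (fun y hy => h y (by simp [hy]))⟩

theorem pvLE_replicate_append (k : Nat) (t : List String) :
    pvLeadingEmpty (List.replicate k "" ++ t) = k + pvLeadingEmpty t := by
  induction k with
  | zero => simp
  | succ n ih => simp [List.replicate_succ, pvLeadingEmpty, ih]; omega

theorem pvLE_append_not_all (l t : List String) (h : ¬ ∀ y ∈ l, y = "") :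
    pvLeadingEmpty (l ++ t) = pvLeadingEmpty l := by
  induction l with
  | nil => simp at h
  | cons y l' ih =>
    by_cases hy : y = ""
    · have h' : ¬ ∀ z ∈ l', z = "" := by simp_all
      simp [pvLeadingEmpty, hy, ih h']
    · simp [pvLeadingEmpty, hy]

-- the trailing-empty counter of A's second loop
def pvTC (a : Nat) : List String → Nat
  | [] => a
  | x :: r => pvTC (if x = "" then a + 1 else 0) r

theorem pvTC_eq (l : List String) (a : Nat) :
    pvTC a l = if ∀ y ∈ l, y = "" then a + l.length else pvLeadingEmpty l.reverse := by
  induction l generalizing a with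
  | nil => simp [pvTC, pvLeadingEmpty]
  | cons x r ih =>
    rw [show pvTC a (x :: r) = pvTC (if x = "" then a + 1 else 0) r from rfl, ih,
        List.reverse_cons]
    by_cases hx : x = ""
    · by_cases hall : ∀ y ∈ r, y = ""
      · have h1 : ∀ y ∈ x :: r, y = "" := by
          intro y hy
          rcases List.mem_cons.mp hy with rfl | hm
          · exact hx
          · exact hall y hm
        rw [if_pos hall, if_pos h1, if_pos hx]
        simp only [List.length_cons]
        omega
      · have h1 : ¬ ∀ y ∈ x :: r, y = "" := by simp_all
        have hrev : ¬ ∀ y ∈ r.reverse, y = "" := by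
          intro hh; exact hall (fun y hy => hh y (List.mem_reverse.mpr hy))
        rw [if_neg hall, if_neg h1, pvLE_append_not_all _ _ hrev]
    · have h1 : ¬ ∀ y ∈ x :: r, y = "" := by
        intro hh; exact hx (hh x (by simp))
      rw [if_neg h1, if_neg hx]
      by_cases hall : ∀ y ∈ r, y = ""
      · have hrrepl : r.reverse = List.replicate r.reverse.length "" := by
          refine pvAllEmpty_replicate _ ?_
          intro y hy; exact hall y (List.mem_reverse.mp hy)
        rw [if_pos hall]
        conv_rhs => rw [hrrepl]
        rw [pvLE_replicate_append]
        simp [pvLeadingEmpty, hx]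
      · have hrev : ¬ ∀ y ∈ r.reverse, y = "" := by
          intro hh; exact hall (fun y hy => hh y (List.mem_reverse.mpr hy))
        rw [if_neg hall, pvLE_append_not_all _ _ hrev]

-- trailing decomposition: l = P ++ replicate (pvTC 0 l) ""
theorem pvTC_decomp (l : List String) :
    ∃ P, l = P ++ List.replicate (pvTC 0 l) "" ∧
      P.length = l.length - pvTC 0 l ∧ pvTC 0 l ≤ l.length := by
  by_cases hall : ∀ y ∈ l, y = ""
  · have hT : pvTC 0 l = l.length := by rw [pvTC_eq, if_pos hall]; omega
    exact ⟨[], by simpa [hT] using pvAllEmpty_replicate l hall, by simp [hT], by simp [hT]⟩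
  · have hT : pvTC 0 l = pvLeadingEmpty l.reverse := by rw [pvTC_eq, if_neg hall]
    have hle : pvLeadingEmpty l.reverse ≤ l.length := by
      have := pvLE_le l.reverse; simpa using this
    refine ⟨(l.reverse.drop (pvLeadingEmpty l.reverse)).reverse, ?_, ?_, ?_⟩
    · rw [hT]
      conv_lhs => rw [← l.reverse_reverse]
      conv_lhs => rw [pvLE_decomp l.reverse]
      simp
    · simp [hT]
    · omega

-- A's second loop once 'beg' is False just appends and tracks the trailing counter
theorem pvStep2A_nonbeg (l : List String) (p a : Nat) (acc : List String) :
    l.foldl pvStep2A (false, p, a, acc) = (false, p, pvTC a l, acc ++ l) := by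
  induction l generalizing a acc with
  | nil => simp [pvTC]
  | cons x r ih =>
    by_cases hx : x = "" <;> simp [pvStep2A, hx, pvTC, ih]

-- A's second loop over leading blanks just counts them
theorem pvStep2A_beg (k : Nat) (rest : List String) (p a : Nat) (acc : List String) :
    (List.replicate k "" ++ rest).foldl pvStep2A (true, p, a, acc)
      = rest.foldl pvStep2A (true, p + k, a, acc ++ List.replicate k "") := by
  induction k generalizing p acc with
  | zero => simp
  | succ n ih =>
    rw [List.replicate_succ, List.cons_append, List.foldl_cons]
    have hstep : pvStep2A (true, p, a, acc) "" = (true, p + 1, a, acc ++ [""]) := by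
      simp [pvStep2A]
    rw [hstep, ih]
    have h1 : p + 1 + n = p + (n + 1) := by omega
    have h2 : acc ++ [""] ++ List.replicate n "" = acc ++ List.replicate (n + 1) "" := by
      simp [List.replicate_succ]
    rw [h1, h2, List.replicate_succ]

-- the whole second pass of A equals B's index-based construction
theorem pvPass2_eq (ns : List String) :
    (let st := ns.foldl pvStep2A (true, 0, 0, ([] : List String));
     if st.2.2.1 < 4 then pvAppendBlanks st.2.2.2 (4 - st.2.2.1) else st.2.2.2)
    =
    (if pvLeadingEmpty ns = ns.length then ns ++ List.replicate 4 ""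
     else
       List.replicate (max 4 (pvLeadingEmpty ns)) ""
         ++ PySem.List.slice ns (some ((pvLeadingEmpty ns : Nat) : Int))
              (some ((ns.length : Int) - ((pvLeadingEmpty ns.reverse : Nat) : Int)))
         ++ List.replicate (max 4 (pvLeadingEmpty ns.reverse)) "") := by
  by_cases hall : pvLeadingEmpty ns = ns.length
  · -- all lines empty
    have hrepl : ns = List.replicate ns.length "" := by
      have := pvLE_decomp ns
      rw [hall] at this
      simpa using this
    rw [if_pos hall]
    conv_lhs =>
      rw [hrepl, show (List.replicate ns.length "" : List String)
            = List.replicate ns.length "" ++ [] by simp, pvStep2A_beg]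
    simp only [List.foldl_nil, Nat.zero_add, List.nil_append]
    rw [if_pos (by omega : (0:Nat) < 4), pvAppendBlanks_eq, Nat.sub_zero, ← hrepl]
  · -- there is a non-empty line
    set L := pvLeadingEmpty ns with hL
    obtain ⟨x, rest, hdrop, hx⟩ := pvLE_head ns hall
    have hns : ns = List.replicate L "" ++ x :: rest := by
      conv_lhs => rw [pvLE_decomp ns]
      rw [hdrop]
    set T := pvTC 0 rest with hTdef
    obtain ⟨P, hP, hPlen, hTle⟩ := pvTC_decomp rest
    have hlen : ns.length = L + 1 + rest.length := by
      rw [hns]; simp [List.length_append]; omega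
    -- evaluate A's fold
    conv_lhs => rw [hns, pvStep2A_beg]
    simp only [Nat.zero_add, List.nil_append, List.foldl_cons]
    have hstep : pvStep2A (true, L, 0, List.replicate L "") x
        = (false, L, 0, List.replicate (max 4 L) "" ++ [x]) := by
      simp only [pvStep2A, if_neg hx, if_pos (show True from trivial)]
      split_ifs with h
      · rw [pvAppendBlanks_eq, ← List.replicate_add]
        have : L + (4 - L) = max 4 L := by omega
        rw [this]
      · have hm : max 4 L = L := by omega
        rw [hm]
    rw [hstep, pvStep2A_nonbeg]
    dsimp only
    -- trail on B's side equals T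
    have htrail : pvLeadingEmpty ns.reverse = T := by
      rw [hns,
          show (List.replicate L "" ++ x :: rest).reverse
            = rest.reverse ++ ([x] ++ List.replicate L "") by simp]
      by_cases hall2 : ∀ y ∈ rest, y = ""
      · have hrrepl : rest.reverse = List.replicate rest.reverse.length "" := by
          refine pvAllEmpty_replicate _ ?_
          intro y hy; exact hall2 y (List.mem_reverse.mp hy)
        conv_lhs => rw [hrrepl]
        rw [pvLE_replicate_append]
        have : pvLeadingEmpty ([x] ++ List.replicate L "") = 0 := by
          simp [pvLeadingEmpty, hx]
        rw [this, hTdef, pvTC_eq, if_pos hall2]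
        simp
      · have hrev : ¬ ∀ y ∈ rest.reverse, y = "" := by
          intro hh; exact hall2 (fun y hy => hh y (List.mem_reverse.mpr hy))
        rw [pvLE_append_not_all _ _ hrev, hTdef, pvTC_eq, if_neg hall2]
    -- B's slice evaluates to x :: P
    have hcast : ((ns.length : Int) - ((pvLeadingEmpty ns.reverse : Nat) : Int))
        = (((ns.length - T : Nat) : Int)) := by
      rw [htrail]; omega
    have hdropL : List.drop L ns = x :: rest := by
      rw [hns]; exact List.drop_left' (by simp)
    have hslice : PySem.List.slice ns (some ((L : Nat) : Int))
          (some ((ns.length : Int) - ((pvLeadingEmpty ns.reverse : Nat) : Int)))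
        = x :: P := by
      rw [hcast, PySem.List.slice_natCast, hdropL,
          show ns.length - T - L = (rest.length - T) + 1 from by omega,
          List.take_succ_cons]
      congr 1
      rw [show rest.length - T = P.length from by omega]
      conv_lhs => rw [hP]
      exact List.take_left
    rw [if_neg hall, hslice, htrail]
    have hP2 : rest = P ++ List.replicate T "" := by rw [hTdef]; exact hP
    -- assemble
    by_cases h4 : T < 4
    · have hrep : List.replicate T "" ++ List.replicate (4 - T) ""
          = List.replicate (max 4 T) "" := by
        rw [← List.replicate_add]
        have : T + (4 - T) = max 4 T := by omega
        rw [this]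
      have hrest : rest ++ List.replicate (4 - T) "" = P ++ List.replicate (max 4 T) "" := by
        conv_lhs => rw [hP2]
        rw [List.append_assoc, hrep]
      rw [if_pos h4, pvAppendBlanks_eq, List.append_assoc, List.append_assoc, hrest]
      simp [List.append_assoc]
    · rw [if_neg h4]
      have hmax : max 4 T = T := by omega
      rw [hmax]
      conv_lhs => rw [hP2]
      simp [List.append_assoc]

theorem pvStyleStepB_eq : pvStyleStepB = pvStyleStepA := rfl

-- ===== VERDICT (by name: the statement is the Claim_ definition above) =====
theorem task_body_save_fix_multiline_markup_bullet_lists_spec : Claim_equal_task_body_save_fix_multiline_markup_bullet_lists := by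
  intro plain _
  unfold Spec_task_body_save_fix_multiline_markup_bullet_lists
  unfold task_body_save_fix_multiline_markup_bullet_lists task_body_save_fix_multiline_markup_bullet_lists_alt
  rw [pvStyleStepB_eq]
  simp only []
  generalize (((PySem.Str.split? (PySem.Str.replace plain "\r" "") "\n").getD []).foldl pvStyleStepA (none, [])).2 = ns
  have h := pvPass2_eq ns
  simp only [] at h
  rw [h]
  split_ifs <;> rfl
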